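-- pv_equiv track=rewrite | github.com/DancingOnAir/LeetcodePythonSolution | string/2047_number_of_valid_words_in_a_sentence.py | countValidWords1
-- ===== SOURCE A (Python) =====
-- def countValidWords1(sentence: str) -> int:
--     res = 0
--     for w in sentence.split():
--         flag = 1
--         num_hyphen = 0
--         for i, c in enumerate(w):
--             if c.isdigit():
--                 flag = 0
--                 break
--             if c == '-':
--                 if i == 0 or i == len(w) - 1 or not (w[i - 1].isalpha() and w[i + 1].isalpha()):
--                     flag = 0
--                     break
--                 else:
--                     num_hyphen += 1
--                     if num_hyphen > 1:
--                         flag = 0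
--                         break
--
--             if c in ('!', '.', ',') and i < len(w) - 1:
--                 flag = 0
--                 break
--         res += flag
--
--     return res
-- ===== SOURCE B (Python) =====
-- def _valid(w):
--     # (1) no digit anywhere
--     if any(c.isdigit() for c in w):
--         return False
--     # (2) '!', '.', ',' allowed only at the last index
--     if any(c in ('!', '.', ',') for c in w[:-1]):
--         return False
--     # (3) at most one hyphen, and it must be strictly inside, between letters
--     h = w.count('-')
--     if h > 1:
--         return False
--     if h == 1:
--         j = w.index('-')
--         return 0 < j < len(w) - 1 and w[j - 1].isalpha() and w[j + 1].isalpha()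
--     return True
--
--
-- def countValidWords1(sentence: str) -> int:
--     return sum(1 for w in sentence.split() if _valid(w))
-- ===== Notes on version B (the rewrite author's own statement) =====
-- stated objective: simpler
-- what changed: Replaces A's fused early-break scan with stateful hyphen counting by three independent whole-word predicates (no digit; no early punctuation via a slice; hyphen validity via count/index), summed over the split words.
import Mathlib
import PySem

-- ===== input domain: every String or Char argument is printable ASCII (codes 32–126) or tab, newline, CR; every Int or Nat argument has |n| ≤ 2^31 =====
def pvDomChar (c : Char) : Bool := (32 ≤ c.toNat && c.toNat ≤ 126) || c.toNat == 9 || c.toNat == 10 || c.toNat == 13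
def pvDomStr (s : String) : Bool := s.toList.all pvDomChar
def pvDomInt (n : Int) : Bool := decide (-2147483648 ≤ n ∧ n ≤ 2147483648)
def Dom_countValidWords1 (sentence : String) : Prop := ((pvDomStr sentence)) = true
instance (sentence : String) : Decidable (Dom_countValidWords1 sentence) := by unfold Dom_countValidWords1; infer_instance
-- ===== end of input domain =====

-- B replaces A's fused early-break per-character scan (with hyphen-counter state) by three
-- independent whole-word predicates (no digit; no early punctuation on a slice; hyphen via
-- count/index) — a different decomposition of the same check, not claimed faster.

-- ===== PORT A =====
-- inner 'for i, c in enumerate(w)' loop of A, with flag/break modeled by returning 0 early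
def pvAGo (w : List Char) (pairs : List (Int × Char)) (numHyphen : Int) : Int :=
  match pairs with
  | [] => 1
  | (i, c) :: rest =>
    if PySem.Chars.isdigit c then 0
    else if c = '-' then
      if i = 0 ∨ i = (w.length : Int) - 1 ∨
          ¬ (PySem.Chars.isalpha (PySem.List.pyGetD w (i - 1) ' ') = true ∧
             PySem.Chars.isalpha (PySem.List.pyGetD w (i + 1) ' ') = true) then 0
      else if numHyphen + 1 > 1 then 0
      else pvAGo w rest (numHyphen + 1)
    else if (c = '!' ∨ c = '.' ∨ c = ',') ∧ i < (w.length : Int) - 1 then 0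
    else pvAGo w rest numHyphen

def countValidWords1 (sentence : String) : Int :=
  (PySem.Str.split₀ sentence).foldl
    (fun res w => res + pvAGo w.toList (PySem.List.enumerate w.toList 0) 0) 0

-- ===== PORT B =====
-- _valid(w) of Source B: three independent predicates (the 'h = w.count('-')' block as a helper)
def pvHyphenCheck (w : List Char) (h : Nat) : Bool :=
  if h > 1 then false
  else if h = 1 then
    match PySem.List.index? w '-' with
    | some j =>
      decide (0 < j) && decide ((j : Int) < (w.length : Int) - 1) &&
      PySem.Chars.isalpha (PySem.List.pyGetD w ((j : Int) - 1) ' ') &&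
      PySem.Chars.isalpha (PySem.List.pyGetD w ((j : Int) + 1) ' ')
    | none => false  -- unreachable: h = 1 means '-' ∈ w
  else true

def pvValid (w : List Char) : Bool :=
  if w.any (fun c => PySem.Chars.isdigit c) then false
  else if (PySem.List.slice w none (some (-1))).any (fun c => c = '!' || c = '.' || c = ',') then false
  else pvHyphenCheck w (PySem.List.count w '-')

def countValidWords1_alt (sentence : String) : Int :=
  (((PySem.Str.split₀ sentence).filter (fun w => pvValid w.toList)).length : Int)

-- ===== PRECONDITION & SPEC =====
def Spec_countValidWords1 (sentence : String) (out : Int) : Prop := out = countValidWords1_alt sentence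
instance (sentence : String) (out : Int) : Decidable (Spec_countValidWords1 sentence out) := by unfold Spec_countValidWords1; infer_instance

-- ===== CLAIM (what is proved, stated in full; the proofs are below) =====
def Claim_equal_countValidWords1 : Prop := ∀ (sentence : String), Dom_countValidWords1 sentence → Spec_countValidWords1 sentence (countValidWords1 sentence)

-- ===== LEMMAS AND PROOFS =====

-- per-position validity condition shared by both characterizations
def pvOk (w : List Char) (i : Int) (c : Char) : Bool :=
  if PySem.Chars.isdigit c then false
  else if c = '-' then
    if i = 0 ∨ i = (w.length : Int) - 1 ∨
        ¬ (PySem.Chars.isalpha (PySem.List.pyGetD w (i - 1) ' ') = true ∧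
           PySem.Chars.isalpha (PySem.List.pyGetD w (i + 1) ' ') = true) then false else true
  else if (c = '!' ∨ c = '.' ∨ c = ',') ∧ i < (w.length : Int) - 1 then false else true

lemma pvOk_digit (w : List Char) (i : Int) (c : Char) (hd : PySem.Chars.isdigit c = true) :
    pvOk w i c = false := by
  simp only [pvOk]; rw [if_pos hd]

lemma pvAGo_char (w : List Char) :
    ∀ (rest : List Char) (k nh : Int), nh ≤ 1 →
    pvAGo w (PySem.List.enumerate rest k) nh =
      if (∀ p ∈ PySem.List.enumerate rest k, pvOk w p.1 p.2 = true) ∧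
          nh + (PySem.List.count rest '-' : Int) ≤ 1 then 1 else 0 := by
  intro rest
  induction rest with
  | nil => intro k nh hnh; simp [pvAGo, PySem.List.enumerate_nil, PySem.List.count_eq, hnh]
  | cons c rest ih =>
    intro k nh hnh
    rw [PySem.List.enumerate_cons]
    have hsplit : (∀ p ∈ ((k, c) : Int × Char) :: PySem.List.enumerate rest (k + 1), pvOk w p.1 p.2 = true) ↔
        (pvOk w k c = true ∧ ∀ p ∈ PySem.List.enumerate rest (k + 1), pvOk w p.1 p.2 = true) :=
      List.forall_mem_cons
    by_cases hd : PySem.Chars.isdigit c = true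
    · have hok : pvOk w k c = false := pvOk_digit w k c hd
      have hA : pvAGo w ((k, c) :: PySem.List.enumerate rest (k + 1)) nh = 0 := by
        simp only [pvAGo]; rw [if_pos hd]
      rw [hA, if_neg]
      rintro ⟨hall, -⟩
      have := (hsplit.1 hall).1
      rw [hok] at this; cases this
    · by_cases hc : c = '-'
      · subst hc
        by_cases hbad : (k = 0 ∨ k = (w.length : Int) - 1 ∨
            ¬ (PySem.Chars.isalpha (PySem.List.pyGetD w (k - 1) ' ') = true ∧
               PySem.Chars.isalpha (PySem.List.pyGetD w (k + 1) ' ') = true))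
        · have hok : pvOk w k '-' = false := by
            simp only [pvOk]; rw [if_neg hd, if_pos trivial, if_pos hbad]
          have hA : pvAGo w ((k, '-') :: PySem.List.enumerate rest (k + 1)) nh = 0 := by
            simp only [pvAGo]; rw [if_neg hd, if_pos trivial, if_pos hbad]
          rw [hA, if_neg]
          rintro ⟨hall, -⟩
          have := (hsplit.1 hall).1
          rw [hok] at this; cases this
        · have hok : pvOk w k '-' = true := by
            simp only [pvOk]; rw [if_neg hd, if_pos trivial, if_neg hbad]
          have hcnt : PySem.List.count ('-' :: rest) '-' = PySem.List.count rest '-' + 1 := by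
            simp [PySem.List.count_eq]
          by_cases hnh2 : nh + 1 > 1
          · have hA : pvAGo w ((k, '-') :: PySem.List.enumerate rest (k + 1)) nh = 0 := by
              simp only [pvAGo]; rw [if_neg hd, if_pos trivial, if_neg hbad, if_pos hnh2]
            rw [hA, if_neg]
            rintro ⟨-, hle⟩
            rw [hcnt] at hle; push_cast at hle; omega
          · have hA : pvAGo w ((k, '-') :: PySem.List.enumerate rest (k + 1)) nh =
                pvAGo w (PySem.List.enumerate rest (k + 1)) (nh + 1) := by
              simp only [pvAGo]; rw [if_neg hd, if_pos trivial, if_neg hbad, if_neg hnh2]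
            rw [hA, ih (k + 1) (nh + 1) (by omega)]
            refine if_congr ?_ rfl rfl
            rw [hsplit, hcnt]
            constructor
            · rintro ⟨hall, hle⟩
              push_cast at hle ⊢; exact ⟨⟨hok, hall⟩, by omega⟩
            · rintro ⟨⟨-, hall⟩, hle⟩
              push_cast at hle ⊢; exact ⟨hall, by omega⟩
      · have hcnt : PySem.List.count (c :: rest) '-' = PySem.List.count rest '-' := by
          simp [PySem.List.count_eq, hc]
        by_cases hpun : (c = '!' ∨ c = '.' ∨ c = ',') ∧ k < (w.length : Int) - 1
        · have hok : pvOk w k c = false := by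
            simp only [pvOk]; rw [if_neg hd, if_neg hc, if_pos hpun]
          have hA : pvAGo w ((k, c) :: PySem.List.enumerate rest (k + 1)) nh = 0 := by
            simp only [pvAGo]; rw [if_neg hd, if_neg hc, if_pos hpun]
          rw [hA, if_neg]
          rintro ⟨hall, -⟩
          have := (hsplit.1 hall).1
          rw [hok] at this; cases this
        · have hok : pvOk w k c = true := by
            simp only [pvOk]; rw [if_neg hd, if_neg hc, if_neg hpun]
          have hA : pvAGo w ((k, c) :: PySem.List.enumerate rest (k + 1)) nh =
              pvAGo w (PySem.List.enumerate rest (k + 1)) nh := by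
            simp only [pvAGo]; rw [if_neg hd, if_neg hc, if_neg hpun]
          rw [hA, ih (k + 1) nh hnh]
          refine if_congr ?_ rfl rfl
          rw [hsplit, hcnt]
          constructor
          · rintro ⟨hall, hle⟩; exact ⟨⟨hok, hall⟩, hle⟩
          · rintro ⟨⟨-, hall⟩, hle⟩; exact ⟨hall, hle⟩

-- positional form of the ∀-over-enumerate condition
lemma pvForall_enum (w : List Char) :
    (∀ p ∈ PySem.List.enumerate w 0, pvOk w p.1 p.2 = true) ↔
      (∀ (k : Nat) (h : k < w.length), pvOk w (k : Int) w[k] = true) := by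
  constructor
  · intro h k hk
    have := h ((0 : Int) + (k : Int), w[k])
      ((PySem.List.mem_enumerate_iff w 0 _).2 ⟨k, hk, rfl⟩)
    simpa using this
  · intro h p hp
    obtain ⟨k, hk, rfl⟩ := (PySem.List.mem_enumerate_iff w 0 p).1 hp
    simpa using h k hk

-- only one hyphen position when count = 1
lemma pvHyphen_unique (w : List Char) (j : Nat)
    (hidx : PySem.List.index? w '-' = some j)
    (hcnt : PySem.List.count w '-' = 1) :
    ∀ (k : Nat) (hk : k < w.length), w[k] = '-' → k = j := by
  obtain ⟨pre, suf, hw, hlen, hnot⟩ := (PySem.List.index?_eq_some_iff w '-' j).1 hidx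
  intro k hk hkv
  by_contra hne
  have hpre : pre.count '-' = 0 := List.count_eq_zero.2 hnot
  have hsuf : suf.count '-' = 0 := by
    have := hcnt
    rw [PySem.List.count_eq] at this
    rw [hw] at this
    simp [List.count_append, hpre] at this
    exact this
  subst hw
  rcases Nat.lt_or_ge k pre.length with hlt | hge
  · have : (pre ++ '-' :: suf)[k] = pre[k]'(by omega) := by
      rw [List.getElem_append_left hlt]
    have hmem : '-' ∈ pre := by rw [this] at hkv; rw [← hkv]; exact List.getElem_mem _
    exact hnot hmem
  · have hgt : pre.length < k := by omega
    have hk' : k - pre.length - 1 < suf.length := by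
      have hlen := hk; simp [List.length_append] at hlen; omega
    obtain ⟨m, hm⟩ : ∃ m, k - pre.length = m + 1 := ⟨k - pre.length - 1, by omega⟩
    have hg : (pre ++ '-' :: suf)[k] = ('-' :: suf)[k - pre.length]'(by simp; omega) :=
      List.getElem_append_right hge
    have hg2 : ('-' :: suf)[k - pre.length]'(by simp; omega) = suf[m]'(by omega) := by
      simp only [hm, List.getElem_cons_succ]
    have hmem : '-' ∈ suf := by
      rw [hg, hg2] at hkv; rw [← hkv]; exact List.getElem_mem _
    have : suf.count '-' ≠ 0 := by
      simp [List.count_eq_zero]; exact hmem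
    exact this hsuf

lemma pvOk_other (w : List Char) (i : Int) (c : Char) (hd : ¬ PySem.Chars.isdigit c = true)
    (hc : c ≠ '-')
    (hpun : ¬ ((c = '!' ∨ c = '.' ∨ c = ',') ∧ i < (w.length : Int) - 1)) :
    pvOk w i c = true := by
  simp only [pvOk]; rw [if_neg hd, if_neg hc, if_neg hpun]

lemma pvOk_hyphen_iff (w : List Char) (i : Int) :
    pvOk w i '-' = true ↔
      ¬ (i = 0 ∨ i = (w.length : Int) - 1 ∨
        ¬ (PySem.Chars.isalpha (PySem.List.pyGetD w (i - 1) ' ') = true ∧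
           PySem.Chars.isalpha (PySem.List.pyGetD w (i + 1) ' ') = true)) := by
  simp only [pvOk]
  rw [if_neg (by decide : ¬ PySem.Chars.isdigit '-' = true), if_pos trivial]
  constructor
  · intro ht hP; rw [if_pos hP] at ht; cases ht
  · intro hP; rw [if_neg hP]

lemma pvValid_char (w : List Char) :
    pvValid w = true ↔
      ((∀ (k : Nat) (h : k < w.length), pvOk w (k : Int) w[k] = true) ∧
        (PySem.List.count w '-' : Int) ≤ 1) := by
  by_cases hdig : w.any (fun c => PySem.Chars.isdigit c) = true
  · have hL : pvValid w = false := by simp only [pvValid]; rw [if_pos hdig]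
    rw [hL]
    constructor
    · intro h; cases h
    · rintro ⟨hall, -⟩
      obtain ⟨c, hcmem, hcd⟩ := List.any_eq_true.1 hdig
      obtain ⟨k, hk, hck⟩ := List.mem_iff_getElem.1 hcmem
      have := hall k hk
      rw [pvOk_digit w k _ (by rw [hck]; exact hcd)] at this; cases this
  · have hdNo : ∀ c ∈ w, ¬ PySem.Chars.isdigit c = true := by
      intro c hc hcd
      exact hdig (List.any_eq_true.2 ⟨c, hc, hcd⟩)
    by_cases hp : (PySem.List.slice w none (some (-1))).any (fun c => c = '!' || c = '.' || c = ',') = true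
    · have hL : pvValid w = false := by simp only [pvValid]; rw [if_neg hdig, if_pos hp]
      rw [hL]
      rw [PySem.List.slice_to_neg_one] at hp
      constructor
      · intro h; cases h
      · rintro ⟨hall, -⟩
        obtain ⟨c, hcmem, hcp⟩ := List.any_eq_true.1 hp
        obtain ⟨k, hk, hck⟩ := List.mem_iff_getElem.1 hcmem
        have hklt : k < w.length - 1 := by
          have := w.length_dropLast ▸ hk; omega
        have hwlen : 1 ≤ w.length := by omega
        have hck' : w[k]'(by omega) = c := by
          rw [← hck, List.getElem_dropLast]
        have hpunct : c = '!' ∨ c = '.' ∨ c = ',' := by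
          simpa [decide_eq_true_iff, or_assoc] using hcp
        have := hall k (by omega)
        rw [hck'] at this
        have hcd : ¬ PySem.Chars.isdigit c = true := by
          rcases hpunct with h | h | h <;> subst h <;> decide
        have hcne : c ≠ '-' := by
          rcases hpunct with h | h | h <;> subst h <;> decide
        have hok : pvOk w k c = false := by
          simp only [pvOk]
          rw [if_neg hcd, if_neg hcne, if_pos ⟨hpunct, by omega⟩]
        rw [hok] at this; cases this
    · have hpNo : ∀ c ∈ w.dropLast, ¬ (c = '!' ∨ c = '.' ∨ c = ',') := by
        intro c hc hcp
        rw [PySem.List.slice_to_neg_one] at hp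
        refine hp (List.any_eq_true.2 ⟨c, hc, ?_⟩)
        simp only [Bool.or_eq_true, decide_eq_true_iff, or_assoc]
        exact hcp
      have hpunOk : ∀ (k : Nat) (hk : k < w.length), w[k] ≠ '-' →
          pvOk w (k : Int) w[k] = true := by
        intro k hk hkne
        refine pvOk_other w k _ (hdNo _ (List.getElem_mem _)) hkne ?_
        rintro ⟨hpunct, hlt⟩
        have hklt : k < w.length - 1 := by omega
        refine hpNo w[k] ?_ hpunct
        have : w.dropLast[k]'(by rw [List.length_dropLast]; omega) = w[k] :=
          List.getElem_dropLast ..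
        rw [← this]; exact List.getElem_mem _
      have hL0 : pvValid w = pvHyphenCheck w (PySem.List.count w '-') := by
        simp only [pvValid]; rw [if_neg hdig, if_neg hp]
      by_cases h2 : PySem.List.count w '-' > 1
      · have hL : pvValid w = false := by
          rw [hL0]; simp only [pvHyphenCheck]; rw [if_pos h2]
        rw [hL]
        constructor
        · intro h; cases h
        · rintro ⟨-, hle⟩
          have : (1 : Int) < (PySem.List.count w '-' : Int) := by exact_mod_cast h2
          omega
      · by_cases h1 : PySem.List.count w '-' = 1
        · have hmem : '-' ∈ w := by
            rw [← List.count_pos_iff]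
            rw [PySem.List.count_eq] at h1; omega
          obtain ⟨j, hj⟩ := Option.isSome_iff_exists.1 ((PySem.List.index?_isSome_iff w '-').2 hmem)
          obtain ⟨hjlt, hjv, hjfirst⟩ := PySem.List.getElem_of_index?_eq_some hj
          have hL : pvValid w =
              (decide (0 < j) && decide ((j : Int) < (w.length : Int) - 1) &&
               PySem.Chars.isalpha (PySem.List.pyGetD w ((j : Int) - 1) ' ') &&
               PySem.Chars.isalpha (PySem.List.pyGetD w ((j : Int) + 1) ' ')) := by
            rw [hL0]; simp only [pvHyphenCheck]; rw [if_neg h2, if_pos h1, hj]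
          rw [hL]
          have hle : (PySem.List.count w '-' : Int) ≤ 1 := by rw [h1]; norm_num
          constructor
          · intro hC
            simp only [Bool.and_eq_true, decide_eq_true_iff] at hC
            obtain ⟨⟨⟨hj0, hjlen⟩, ha1⟩, ha2⟩ := hC
            refine ⟨?_, hle⟩
            intro k hk
            by_cases hkv : w[k] = '-'
            · have hkj : k = j := pvHyphen_unique w j hj h1 k hk hkv
              subst hkj
              rw [hkv, pvOk_hyphen_iff]
              push_neg
              exact ⟨by omega, by omega, ha1, ha2⟩
            · exact hpunOk k hk hkv
          · rintro ⟨hall, -⟩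
            have := hall j hjlt
            rw [hjv, pvOk_hyphen_iff] at this
            push_neg at this
            obtain ⟨hj0, hjlen, ha1, ha2⟩ := this
            simp only [Bool.and_eq_true, decide_eq_true_iff]
            exact ⟨⟨⟨by omega, by omega⟩, ha1⟩, ha2⟩
        · have h0 : PySem.List.count w '-' = 0 := by omega
          have hnomem : '-' ∉ w := by
            rw [PySem.List.count_eq] at h0
            exact List.count_eq_zero.1 h0
          have hL : pvValid w = true := by
            rw [hL0]; simp only [pvHyphenCheck]; rw [if_neg h2, if_neg h1]
          rw [hL]
          constructor
          · intro _
            refine ⟨?_, by rw [h0]; norm_num⟩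
            intro k hk
            refine hpunOk k hk ?_
            intro hkv
            exact hnomem (hkv ▸ List.getElem_mem _)
          · intro _; rfl

-- per-word agreement
lemma pvWord (w : List Char) :
    pvAGo w (PySem.List.enumerate w 0) 0 = if pvValid w then 1 else 0 := by
  rw [pvAGo_char w w 0 0 (by omega)]
  refine if_congr ?_ rfl rfl
  rw [pvForall_enum, pvValid_char]
  constructor
  · rintro ⟨h1, h2⟩; exact ⟨h1, by omega⟩
  · rintro ⟨h1, h2⟩; exact ⟨h1, by omega⟩

lemma pvFold (ws : List String) : ∀ (res : Int),
    ws.foldl (fun res w => res + pvAGo w.toList (PySem.List.enumerate w.toList 0) 0) res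
      = res + ((ws.filter (fun w => pvValid w.toList)).length : Int) := by
  induction ws with
  | nil => intro res; simp
  | cons w ws ih =>
    intro res
    simp only [List.foldl_cons, List.filter_cons]
    rw [ih, pvWord]
    by_cases hv : pvValid w.toList = true
    · simp [hv]; push_cast; ring
    · simp [hv]

-- ===== VERDICT (by name: the statement is the Claim_ definition above) =====
theorem countValidWords1_spec : Claim_equal_countValidWords1 := by
  intro sentence _
  unfold Spec_countValidWords1 countValidWords1 countValidWords1_alt
  rw [pvFold]
  simp
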